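-- pv_equiv track=rewrite | github.com/wecoders/CloudNewsOld | espider/utils.py | merge_cookie
-- ===== SOURCE A (Python) =====
-- def split_cookie(cookies):
--     cookie_headers = {}
--     c_arr = cookies.split(';')
--     for i in c_arr:
--         i = i.strip()
--         s = i.split('=')
--         if len(s)==2:
--             k = s[0]
--             v = s[1]
--             if k == 'path' or k == 'HttpOnly':
--                 continue
--             cookie_headers[k] = v
--     return cookie_headers
--
-- def merge_cookie(new_cookie, old_cookie):
--     cookie_headers = split_cookie(new_cookie)
--
--     if old_cookie is None:
--         return "; ".join(['%s=%s'%(key,value) for (key,value) in cookie_headers.items()])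
--     else:
--         old_cookie_headers = split_cookie(old_cookie)
--         new_cookies = dict(old_cookie_headers)
--         new_cookies.update(cookie_headers)# dict(old_cookie_headers.items()+cookie_headers.items())
--         return "; ".join(['%s=%s'%(key,value) for (key,value) in new_cookies.items()])
-- ===== SOURCE B (Python) =====
-- def merge_cookie(new_cookie, old_cookie):
--     combined = new_cookie if old_cookie is None else old_cookie + ';' + new_cookie
--     cookie = {}
--     for part in combined.split(';'):
--         kv = part.strip().split('=')
--         if len(kv) == 2 and kv[0] != 'path' and kv[0] != 'HttpOnly':
--             cookie[kv[0]] = kv[1]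
--     return '; '.join('%s=%s' % kv for kv in cookie.items())
-- ===== Notes on version B (the rewrite author's own statement) =====
-- stated objective: simpler
-- what changed: Replaces the parse-each-string-into-a-dict-then-dict.update decomposition (helper split_cookie called twice plus a dict copy and merge) with a single parse loop over the concatenated string old_cookie + ';' + new_cookie accumulating into one ordered dict, where later (new) entries override earlier (old) ones in place.
import Mathlib
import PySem

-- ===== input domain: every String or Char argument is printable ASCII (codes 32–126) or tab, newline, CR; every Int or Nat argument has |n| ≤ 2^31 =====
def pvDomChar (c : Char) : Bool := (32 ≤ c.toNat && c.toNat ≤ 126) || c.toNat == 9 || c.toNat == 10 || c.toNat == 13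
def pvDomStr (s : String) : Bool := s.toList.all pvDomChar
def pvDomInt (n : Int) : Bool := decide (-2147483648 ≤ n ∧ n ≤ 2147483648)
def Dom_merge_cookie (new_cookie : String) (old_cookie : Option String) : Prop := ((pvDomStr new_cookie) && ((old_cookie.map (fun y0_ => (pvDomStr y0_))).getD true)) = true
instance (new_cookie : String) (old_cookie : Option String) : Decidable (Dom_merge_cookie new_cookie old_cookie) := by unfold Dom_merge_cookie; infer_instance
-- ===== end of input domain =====

-- B replaces A's parse-both-strings-then-dict.update decomposition by ONE parse pass over the
-- concatenated string old + ';' + new accumulating into a single ordered dict (objective: simpler).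

-- ===== PORT A =====
-- helper split_cookie of A, literal: split on ';', strip, keep exactly the len==2 '=' splits,
-- skip keys 'path'/'HttpOnly', assign into an insertion-ordered dict
def splitCookieA (cookies : List Char) : PySem.Dict (List Char) (List Char) :=
  (PySem.Chars.splitOn cookies [';']).foldl
    (fun d i0 =>
      match PySem.Chars.splitOn (PySem.Chars.strip i0) ['='] with
      | [k, v] => if k = "path".toList ∨ k = "HttpOnly".toList then d else d.insert k v
      | _ => d)
    PySem.Dict.empty

def merge_cookie (new_cookie : String) (old_cookie : Option String) : String :=
  let cookie_headers := splitCookieA new_cookie.toList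
  match old_cookie with
  | none =>
      String.ofList (PySem.Chars.join ("; ".toList)
        (cookie_headers.items.map (fun p => p.1 ++ '=' :: p.2)))
  | some oc =>
      let old_cookie_headers := splitCookieA oc.toList
      let new_cookies := old_cookie_headers.update cookie_headers.items
      String.ofList (PySem.Chars.join ("; ".toList)
        (new_cookies.items.map (fun p => p.1 ++ '=' :: p.2)))

-- ===== PORT B =====
def merge_cookie_alt (new_cookie : String) (old_cookie : Option String) : String :=
  let combined : List Char :=
    match old_cookie with
    | none => new_cookie.toList
    | some oc => oc.toList ++ ';' :: new_cookie.toList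
  let cookie := (PySem.Chars.splitOn combined [';']).foldl
    (fun d part =>
      match PySem.Chars.splitOn (PySem.Chars.strip part) ['='] with
      | [k, v] => if k ≠ "path".toList ∧ k ≠ "HttpOnly".toList then d.insert k v else d
      | _ => d)
    PySem.Dict.empty
  String.ofList (PySem.Chars.join ("; ".toList) (cookie.items.map (fun p => p.1 ++ '=' :: p.2)))

-- ===== PRECONDITION & SPEC =====
def Spec_merge_cookie (new_cookie : String) (old_cookie : Option String) (out : String) : Prop := out = merge_cookie_alt new_cookie old_cookie
instance (new_cookie : String) (old_cookie : Option String) (out : String) : Decidable (Spec_merge_cookie new_cookie old_cookie out) := by unfold Spec_merge_cookie; infer_instance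

-- ===== CLAIM (what is proved, stated in full; the proofs are below) =====
def Claim_equal_merge_cookie : Prop := ∀ (new_cookie : String) (old_cookie : Option String), Dom_merge_cookie new_cookie old_cookie → Spec_merge_cookie new_cookie old_cookie (merge_cookie new_cookie old_cookie)

-- ===== LEMMAS AND PROOFS =====

-- specification of splitting on a single-character separator
def pvSplit (c : Char) : List Char → List (List Char)
  | [] => [[]]
  | x :: xs => if x = c then [] :: pvSplit c xs else (pvSplit c xs).modifyHead (x :: ·)

theorem pvSplit_ne_nil (c : Char) (l : List Char) : pvSplit c l ≠ [] := by
  cases l with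
  | nil => simp [pvSplit]
  | cons x xs =>
      simp only [pvSplit]
      split_ifs
      · simp
      · cases h : pvSplit c xs with
        | nil => exact absurd h (pvSplit_ne_nil c xs)
        | cons a as => simp [List.modifyHead]

theorem pv_modifyHead_modifyHead {α : Type} (f g : α → α) (l : List α) :
    (l.modifyHead g).modifyHead f = l.modifyHead (fun x => f (g x)) := by
  cases l <;> simp [List.modifyHead]

theorem pv_modifyHead_idfun {α : Type} (l : List α) : l.modifyHead (fun x => x) = l := by
  cases l <;> simp [List.modifyHead]

theorem pv_go_eq (c : Char) :
    ∀ (l : List Char) (fuel : Nat) (cur : List Char) (acc : List (List Char)),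
    l.length < fuel →
    PySem.Chars.splitOn.go [c] fuel l cur acc
      = acc.reverse ++ (pvSplit c l).modifyHead (cur.reverse ++ ·) := by
  intro l
  induction l with
  | nil =>
      intro fuel cur acc hf
      obtain ⟨f, rfl⟩ : ∃ f, fuel = f + 1 := ⟨fuel - 1, by omega⟩
      rw [PySem.Chars.splitOn.go.eq_def]
      simp [pvSplit, List.modifyHead]
  | cons x xs ih =>
      intro fuel cur acc hf
      obtain ⟨f, rfl⟩ : ∃ f, fuel = f + 1 := ⟨fuel - 1, by omega⟩
      rw [PySem.Chars.splitOn.go.eq_def]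
      by_cases hx : x = c
      · subst hx
        have hpre : ([x].isPrefixOf (x :: xs) && true) = true := by simp [List.isPrefixOf]
        simp only [List.isPrefixOf, beq_self_eq_true, Bool.and_true, if_true,
          List.length_cons, List.length_nil, Nat.zero_add, List.drop_succ_cons, List.drop_zero]
        rw [ih f [] (cur.reverse :: acc) (by simp at hf; omega)]
        simp only [pvSplit, List.modifyHead, List.reverse_cons, List.reverse_nil,
          List.nil_append, List.append_assoc, List.cons_append]
        cases pvSplit x xs <;> simp
      · have hb : (c == x) = false := by
          simp only [beq_eq_false_iff_ne, ne_eq]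
          exact fun hcx => hx hcx.symm
        simp only [List.isPrefixOf, hb, Bool.false_and, Bool.false_eq_true, if_false]
        rw [ih f (x :: cur) acc (by simp at hf; omega)]
        simp only [pvSplit, if_neg hx, pv_modifyHead_modifyHead, List.reverse_cons]
        congr 1
        congr 1
        funext t
        simp

theorem pv_splitOn_single (c : Char) (s : List Char) :
    PySem.Chars.splitOn s [c] = pvSplit c s := by
  have h := pv_go_eq c s (s.length + 1) [] [] (by omega)
  simpa [PySem.Chars.splitOn, pv_modifyHead_idfun] using h

theorem pv_modifyHead_append {α : Type} (f : α → α) (l1 l2 : List α) (h : l1 ≠ []) :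
    (l1 ++ l2).modifyHead f = l1.modifyHead f ++ l2 := by
  cases l1 with
  | nil => exact absurd rfl h
  | cons a as => simp [List.modifyHead]

theorem pvSplit_append (c : Char) (a b : List Char) :
    pvSplit c (a ++ c :: b) = pvSplit c a ++ pvSplit c b := by
  induction a with
  | nil => simp [pvSplit]
  | cons x xs ih =>
      simp only [List.cons_append, pvSplit, ih]
      split_ifs with h
      · rfl
      · rw [pv_modifyHead_append _ _ _ (pvSplit_ne_nil c xs)]

theorem pv_splitOn_append (c : Char) (a b : List Char) :
    PySem.Chars.splitOn (a ++ c :: b) [c]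
      = PySem.Chars.splitOn a [c] ++ PySem.Chars.splitOn b [c] := by
  simp [pv_splitOn_single, pvSplit_append]

-- the entry a stripped cookie fragment contributes (if any)
def pvParse (part : List Char) : Option (List Char × List Char) :=
  match PySem.Chars.splitOn (PySem.Chars.strip part) ['='] with
  | [k, v] => if k = "path".toList ∨ k = "HttpOnly".toList then none else some (k, v)
  | _ => none

def pvEntries (parts : List (List Char)) : List (List Char × List Char) :=
  parts.filterMap pvParse

theorem pv_bodyA_eq (d : PySem.Dict (List Char) (List Char)) (p : List Char) :
    (match PySem.Chars.splitOn (PySem.Chars.strip p) ['='] with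
      | [k, v] => if k = "path".toList ∨ k = "HttpOnly".toList then d else d.insert k v
      | _ => d)
    = (match pvParse p with | none => d | some kv => d.insert kv.1 kv.2) := by
  unfold pvParse
  rcases PySem.Chars.splitOn (PySem.Chars.strip p) ['='] with _ | ⟨k, _ | ⟨v, _ | _⟩⟩ <;>
    try rfl
  show (if k = "path".toList ∨ k = "HttpOnly".toList then d else d.insert k v)
      = (match (if k = "path".toList ∨ k = "HttpOnly".toList then none else some (k, v)) with
          | none => d | some kv => d.insert kv.1 kv.2)
  by_cases h : k = "path".toList ∨ k = "HttpOnly".toList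
  · rw [if_pos h, if_pos h]
  · rw [if_neg h, if_neg h]

theorem pv_bodyB_eq (d : PySem.Dict (List Char) (List Char)) (p : List Char) :
    (match PySem.Chars.splitOn (PySem.Chars.strip p) ['='] with
      | [k, v] => if k ≠ "path".toList ∧ k ≠ "HttpOnly".toList then d.insert k v else d
      | _ => d)
    = (match pvParse p with | none => d | some kv => d.insert kv.1 kv.2) := by
  unfold pvParse
  rcases PySem.Chars.splitOn (PySem.Chars.strip p) ['='] with _ | ⟨k, _ | ⟨v, _ | _⟩⟩ <;>
    try rfl
  show (if k ≠ "path".toList ∧ k ≠ "HttpOnly".toList then d.insert k v else d)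
      = (match (if k = "path".toList ∨ k = "HttpOnly".toList then none else some (k, v)) with
          | none => d | some kv => d.insert kv.1 kv.2)
  by_cases h : k = "path".toList ∨ k = "HttpOnly".toList
  · have h' : ¬ (k ≠ "path".toList ∧ k ≠ "HttpOnly".toList) := by tauto
    rw [if_neg h', if_pos h]
  · have h' : k ≠ "path".toList ∧ k ≠ "HttpOnly".toList := by tauto
    rw [if_pos h', if_neg h]

theorem pv_foldA_eq (parts : List (List Char)) :
    ∀ d : PySem.Dict (List Char) (List Char),
    parts.foldl
      (fun d i0 =>
        match PySem.Chars.splitOn (PySem.Chars.strip i0) ['='] with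
        | [k, v] => if k = "path".toList ∨ k = "HttpOnly".toList then d else d.insert k v
        | _ => d) d
      = d.update (pvEntries parts) := by
  induction parts with
  | nil => intro d; rfl
  | cons p rest ih =>
      intro d
      rw [List.foldl_cons]
      show rest.foldl _
          (match PySem.Chars.splitOn (PySem.Chars.strip p) ['='] with
            | [k, v] => if k = "path".toList ∨ k = "HttpOnly".toList then d else d.insert k v
            | _ => d) = _
      rw [pv_bodyA_eq d p]
      cases hp : pvParse p with
      | none =>
          simp only [hp, pvEntries, List.filterMap_cons]
          exact ih d
      | some kv =>
          simp only [hp, pvEntries, List.filterMap_cons]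
          exact ih (d.insert kv.1 kv.2)

theorem pv_foldB_eq (parts : List (List Char)) :
    ∀ d : PySem.Dict (List Char) (List Char),
    parts.foldl
      (fun d part =>
        match PySem.Chars.splitOn (PySem.Chars.strip part) ['='] with
        | [k, v] => if k ≠ "path".toList ∧ k ≠ "HttpOnly".toList then d.insert k v else d
        | _ => d) d
      = d.update (pvEntries parts) := by
  induction parts with
  | nil => intro d; rfl
  | cons p rest ih =>
      intro d
      rw [List.foldl_cons]
      show rest.foldl _
          (match PySem.Chars.splitOn (PySem.Chars.strip p) ['='] with
            | [k, v] => if k ≠ "path".toList ∧ k ≠ "HttpOnly".toList then d.insert k v else d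
            | _ => d) = _
      rw [pv_bodyB_eq d p]
      cases hp : pvParse p with
      | none =>
          simp only [hp, pvEntries, List.filterMap_cons]
          exact ih d
      | some kv =>
          simp only [hp, pvEntries, List.filterMap_cons]
          exact ih (d.insert kv.1 kv.2)

-- inserting at an already-present key commutes with inserting at a different key
theorem pv_insert_comm (Z : PySem.Dict (List Char) (List Char)) (k k' v v' : List Char)
    (h : Z.contains k = true) (hne : k' ≠ k) :
    (Z.insert k' v').insert k v = (Z.insert k v).insert k' v' := by
  have hkk' : ¬ (k = k') := fun q => hne q.symm
  have hA : (Z.insert k' v').contains k = true := by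
    rw [PySem.Dict.contains_insert]; simp [h]
  have hkv : (Z.insert k v).contains k' = Z.contains k' := by
    rw [PySem.Dict.contains_insert]; simp [hne]
  by_cases hc' : Z.contains k' = true
  · have hB : (Z.insert k v).contains k' = true := by rw [hkv]; exact hc'
    apply PySem.Dict.ext
    rw [PySem.Dict.items_insert_of_contains _ _ hA,
        PySem.Dict.items_insert_of_contains _ _ hc',
        PySem.Dict.items_insert_of_contains _ _ hB,
        PySem.Dict.items_insert_of_contains _ _ h,
        List.map_map, List.map_map]
    congr 1
    funext p
    simp only [Function.comp_apply]
    by_cases h1 : p.1 = k' <;> by_cases h2 : p.1 = k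
    · exact absurd (h1.symm.trans h2) hne
    · simp [h1, hne]
    · simp [h2, hkk']
    · simp [h1, h2]
  · have hc'' : Z.contains k' = false := by simpa using hc'
    have hB : (Z.insert k v).contains k' = false := by rw [hkv]; exact hc''
    apply PySem.Dict.ext
    rw [PySem.Dict.items_insert_of_contains _ _ hA,
        PySem.Dict.items_insert_of_not_contains _ _ hc'',
        PySem.Dict.items_insert_of_not_contains _ _ hB,
        PySem.Dict.items_insert_of_contains _ _ h]
    simp [hne]

theorem pv_update_insert_comm (L : List (List Char × List Char)) :
    ∀ (Z : PySem.Dict (List Char) (List Char)) (k v : List Char),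
    Z.contains k = true → (∀ p ∈ L, p.1 ≠ k) →
    (Z.update L).insert k v = (Z.insert k v).update L := by
  induction L with
  | nil => intro Z k v _ _; rfl
  | cons p L ih =>
      intro Z k v hc hk
      show ((Z.insert p.1 p.2).update L).insert k v = _
      rw [ih (Z.insert p.1 p.2) k v
          (by rw [PySem.Dict.contains_insert]; simp [hc])
          (fun q hq => hk q (List.mem_cons_of_mem _ hq)),
        pv_insert_comm Z k p.1 v p.2 hc (hk p (List.mem_cons_self))]
      rfl

theorem pv_items_decomp (Z : PySem.Dict (List Char) (List Char)) (k : List Char)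
    (h : Z.contains k = true) (hnd : Z.keys.Nodup) :
    ∃ L1 w L2, Z.items = L1 ++ (k, w) :: L2 ∧ (∀ p ∈ L1, p.1 ≠ k) ∧ (∀ p ∈ L2, p.1 ≠ k) := by
  have hk : k ∈ Z.keys := (PySem.Dict.contains_iff_mem_keys _ _).1 h
  simp only [PySem.Dict.keys, List.mem_map] at hk
  obtain ⟨p, hp, hpk⟩ := hk
  obtain ⟨L1, L2, hit⟩ := List.append_of_mem hp
  have hnd' : (L1.map Prod.fst ++ k :: L2.map Prod.fst).Nodup := by
    have h0 := hnd
    simp only [PySem.Dict.keys] at h0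
    rw [hit] at h0
    simpa [hpk] using h0
  have hmem1 : k ∉ L1.map Prod.fst := by
    have hd := (List.nodup_append.mp hnd').2.2
    intro hm
    exact hd k hm k (List.mem_cons_self) rfl
  have hmem2 : k ∉ L2.map Prod.fst :=
    (List.nodup_cons.mp (List.nodup_append.mp hnd').2.1).1
  exact ⟨L1, p.2, L2, by rw [hit, ← hpk],
    fun q hq hqk => hmem1 (hqk ▸ List.mem_map_of_mem hq),
    fun q hq hqk => hmem2 (hqk ▸ List.mem_map_of_mem hq)⟩

theorem pv_update_items_insert (e : PySem.Dict (List Char) (List Char))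
    (d : PySem.Dict (List Char) (List Char)) (k v : List Char) (hnd : e.keys.Nodup) :
    d.update ((e.insert k v).items) = (d.update e.items).insert k v := by
  by_cases hc : e.contains k = true
  · obtain ⟨L1, w, L2, hit, h1, h2⟩ := pv_items_decomp e k hc hnd
    have hins : (e.insert k v).items = L1 ++ (k, v) :: L2 := by
      rw [PySem.Dict.items_insert_of_contains _ _ hc, hit, List.map_append, List.map_cons]
      have m1 : L1.map (fun p => if (p.1 == k) = true then (k, v) else p) = L1 := by
        rw [List.map_congr_left (g := id) (fun p hp => by simp [h1 p hp]), List.map_id]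
      have m2 : L2.map (fun p => if (p.1 == k) = true then (k, v) else p) = L2 := by
        rw [List.map_congr_left (g := id) (fun p hp => by simp [h2 p hp]), List.map_id]
      rw [m1, m2]
      simp
    rw [hins, hit]
    show (L1 ++ (k, v) :: L2).foldl (fun acc p => acc.insert p.1 p.2) d = _
    rw [List.foldl_append, List.foldl_cons]
    show ((d.update L1).insert k v).update L2
        = (((L1 ++ (k, w) :: L2).foldl (fun acc p => acc.insert p.1 p.2) d).insert k v)
    rw [List.foldl_append, List.foldl_cons]
    show _ = (((d.update L1).insert k w).update L2).insert k v
    rw [pv_update_insert_comm L2 ((d.update L1).insert k w) k v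
        (PySem.Dict.contains_insert_self _ _ _) h2,
      PySem.Dict.insert_insert_self]
  · rw [PySem.Dict.items_insert_of_not_contains _ _ (by simpa using hc)]
    show (e.items ++ [(k, v)]).foldl (fun acc p => acc.insert p.1 p.2) d = _
    rw [List.foldl_append]
    rfl

theorem pv_update_update_items (L : List (List Char × List Char)) :
    ∀ (e d : PySem.Dict (List Char) (List Char)), e.keys.Nodup →
    d.update ((e.update L).items) = (d.update e.items).update L := by
  induction L with
  | nil => intro e d _; rfl
  | cons p L ih =>
      intro e d h
      show d.update (((e.insert p.1 p.2).update L).items) = _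
      rw [ih (e.insert p.1 p.2) d (PySem.Dict.nodup_keys_insert _ _ _ h),
          pv_update_items_insert e d p.1 p.2 h]
      rfl

-- ===== VERDICT (by name: the statement is the Claim_ definition above) =====
theorem merge_cookie_spec : Claim_equal_merge_cookie := by
  intro n o _
  unfold Spec_merge_cookie
  cases o with
  | none =>
      simp only [merge_cookie, merge_cookie_alt, splitCookieA]
      rw [pv_foldA_eq, pv_foldB_eq]
  | some oc =>
      simp only [merge_cookie, merge_cookie_alt, splitCookieA]
      rw [pv_foldA_eq, pv_foldA_eq, pv_splitOn_append, List.foldl_append,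
        pv_foldB_eq, pv_foldB_eq,
        pv_update_update_items (pvEntries (PySem.Chars.splitOn n.toList [';']))
          PySem.Dict.empty (PySem.Dict.empty.update (pvEntries (PySem.Chars.splitOn oc.toList [';'])))
          PySem.Dict.nodup_keys_empty]
      rfl
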